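-- pv_equiv track=rewrite | github.com/Musayyeb/MJ23 | mapping/map_preds_2.py | unique_letters
-- ===== SOURCE A (Python) =====
-- def unique_letters(text):       # A generator - yield repeated letters once with repeat counter
--
--     skip = 0
--     for ndx, ltr in enumerate(text):
--         if skip:
--             # skip over previously processed letters
--             skip -= 1
--             continue
--
--         # double letters are detected only once, but are counted
--         dndx = ndx
--         repeat = 1
--         while True:
--             dndx += 1
--             if dndx < len(text) and text[dndx] == ltr:
--                 repeat += 1
--                 skip += 1
--                 continue
--             else:
--                 break
--
--
--         return ndx, ltr, repeat      # yeild ndx, ltr, repeat       # This changed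
-- ===== SOURCE B (Python) =====
-- def unique_letters(text):
--     # Return (0, first letter, length of the leading run of that letter).
--     # Empty text -> None (implicitly), as in A.
--     if text:
--         c = text[0]
--         return 0, c, len(text) - len(text.lstrip(c))
-- ===== Notes on version B (the rewrite author's own statement) =====
-- stated objective: simpler
-- what changed: A's enumerate loop with a skip counter and an inner index-walking while loop is replaced by a single expression: leading run length = len(text) - len(text.lstrip(first_char)).
-- outside the precondition, e.g. on unique_letters(''): A returns None, B returns None
import Mathlib
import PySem

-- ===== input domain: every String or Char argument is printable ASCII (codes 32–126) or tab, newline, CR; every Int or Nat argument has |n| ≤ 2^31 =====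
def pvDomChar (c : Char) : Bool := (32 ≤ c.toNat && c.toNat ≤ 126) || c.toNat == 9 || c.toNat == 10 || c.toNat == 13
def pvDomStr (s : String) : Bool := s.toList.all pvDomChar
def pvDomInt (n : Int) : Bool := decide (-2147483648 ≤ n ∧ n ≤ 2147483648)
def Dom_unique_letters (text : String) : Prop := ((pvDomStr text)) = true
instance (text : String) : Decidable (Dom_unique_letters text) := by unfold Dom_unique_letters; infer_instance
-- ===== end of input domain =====

-- B replaces A's enumerate/skip loop and inner index-walking while loop by one expression
-- (length minus the length after stripping the leading run); simpler, same cost.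

-- ===== PORT A =====
-- inner 'while True' loop of A: dndx += 1; if dndx < len(text) and text[dndx] == ltr: repeat += 1 else break
def uaWhile (text : List Char) (ltr : Char) (dndx : Nat) (rep : Int) : Int :=
  let d := dndx + 1
  if h : d < text.length then
    if text[d] == ltr then uaWhile text ltr d (rep + 1) else rep
  else rep
termination_by text.length - dndx
decreasing_by omega

-- the 'for ndx, ltr in enumerate(text)' loop with the skip counter (A returns inside the first unskipped iteration)
def uaFor (text : List Char) (pairs : List (Int × Char)) (skip : Int) : Option (Int × String × Int) :=
  match pairs with
  | [] => none
  | (ndx, ltr) :: rest =>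
    if skip ≠ 0 then uaFor text rest (skip - 1)
    else some (ndx, String.ofList [ltr], uaWhile text ltr ndx.toNat 1)

def unique_letters (text : String) : Int × String × Int :=
  (uaFor text.toList (PySem.List.enumerate text.toList) 0).getD (0, "", 0)

-- ===== PORT B =====
def unique_letters_alt (text : String) : Int × String × Int :=
  match text.toList with
  | [] => (0, "", 0)   -- outside Pre_ (the Python B returns None here, like A)
  | c :: _ =>
    (0, String.ofList [c],
      (text.toList.length : Int) - ((text.toList.dropWhile (· == c)).length : Int))

-- ===== PRECONDITION & SPEC =====
-- Pre_ excludes only the empty string: there A (and B) return None, not a value of the declared type.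
def Pre_unique_letters (text : String) : Prop := text ≠ ""
instance (text : String) : Decidable (Pre_unique_letters text) := by unfold Pre_unique_letters; infer_instance
def pvWitness_unique_letters : String := "aab"

def Spec_unique_letters (text : String) (out : Int × String × Int) : Prop := out = unique_letters_alt text
instance (text : String) (out : Int × String × Int) : Decidable (Spec_unique_letters text out) := by unfold Spec_unique_letters; infer_instance

-- ===== CLAIM (what is proved, stated in full; the proofs are below) =====
def Claim_equal_unique_letters : Prop := ∀ (text : String), Dom_unique_letters text → Pre_unique_letters text → Spec_unique_letters text (unique_letters text)

-- ===== LEMMAS AND PROOFS =====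

-- A's while loop adds, on top of rep, the length of the run of ltr starting at index dndx+1.
theorem uaWhile_eq (text : List Char) (ltr : Char) (dndx : Nat) (rep : Int) :
    uaWhile text ltr dndx rep
      = rep + (((text.drop (dndx + 1)).takeWhile (· == ltr)).length : Int) := by
  fun_induction uaWhile text ltr dndx rep with
  | case1 dndx rep d h hb ih =>
      rw [ih, List.drop_eq_getElem_cons h, List.takeWhile_cons, if_pos (by simpa using hb)]
      simp only [List.length_cons]
      push_cast
      ring
  | case2 dndx rep d h hb =>
      rw [List.drop_eq_getElem_cons h, List.takeWhile_cons, if_neg (by simpa using hb)]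
      simp
  | case3 dndx rep d h =>
      rw [List.drop_eq_nil_of_le (by omega)]
      simp

theorem unique_letters_spec : Claim_equal_unique_letters := by
  intro text _ hpre
  have hne : text.toList ≠ [] := fun h => hpre (String.toList_eq_nil_iff.mp h)
  obtain ⟨c, rest, hl⟩ : ∃ c rest, text.toList = c :: rest := by
    cases h : text.toList with
    | nil => exact absurd h hne
    | cons a l => exact ⟨a, l, rfl⟩
  unfold Spec_unique_letters unique_letters unique_letters_alt
  rw [hl]
  have hlen : (rest.takeWhile (· == c)).length + (rest.dropWhile (· == c)).length
      = rest.length := by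
    rw [← List.length_append, List.takeWhile_append_dropWhile]
  simp [PySem.List.enumerate_cons, uaFor, uaWhile_eq]
  omega
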